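-- pv_equiv track=rewrite | github.com/Yawn-Sean/Daily_CF_Problems | daily_problems/2026/03/0313/personal_submission/cf106421g_Meguhine.py | work
-- ===== SOURCE A (Python) =====
-- from itertools import accumulate
-- from typing import Any, List
--
-- class FenwickTree:
--
--     def __init__(self, n: int = 0) -> None:
--         self._n = n
--         self.data = [0] * n
--
--     def add(self, p: int, x: Any) -> None:
--         assert 0 <= p < self._n
--
--         p += 1
--         while p <= self._n:
--             self.data[p - 1] += x
--             p += p & -p
--
--     # [l, r - 1]
--     def sum(self, left: int, right: int) -> Any:
--         assert 0 <= left <= right <= self._n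
--
--         return self._sum(right) - self._sum(left)
--
--     # [0, r - 1]
--     def _sum(self, r: int) -> Any:
--         s = 0
--         while r > 0:
--             s += self.data[r - 1]
--             r -= r & -r
--
--         return s
--
-- def work(a: List[int]) -> int:
--     b = sorted(set(accumulate(a, initial=0)))
--     mp = {x: i for i, x in enumerate(b)}
--     s, res, fen = 0, 0, FenwickTree(len(b) + 5)
--     fen.add(mp[0], 1)
--     for x in a:
--         s += x
--         disc_s = mp[s]
--         res += fen._sum(disc_s)
--         fen.add(disc_s, 1)
--     return res
-- ===== SOURCE B (Python) =====
-- def work(a):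
--     # Direct pair count over prefix sums: for each new prefix sum, count how
--     # many earlier prefix sums (including the initial 0) are strictly smaller.
--     s = 0
--     res = 0
--     prev = [0]
--     for x in a:
--         s += x
--         res += sum(1 for t in prev if t < s)
--         prev.append(s)
--     return res
-- ===== Notes on version B (the rewrite author's own statement) =====
-- stated objective: simpler
-- what changed: Replaces A's coordinate compression (sorted set + rank dict) and Fenwick tree with a direct scan that keeps the list of previous prefix sums and counts those strictly below the current one; no sorting, no dict, no tree.
import Mathlib
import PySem

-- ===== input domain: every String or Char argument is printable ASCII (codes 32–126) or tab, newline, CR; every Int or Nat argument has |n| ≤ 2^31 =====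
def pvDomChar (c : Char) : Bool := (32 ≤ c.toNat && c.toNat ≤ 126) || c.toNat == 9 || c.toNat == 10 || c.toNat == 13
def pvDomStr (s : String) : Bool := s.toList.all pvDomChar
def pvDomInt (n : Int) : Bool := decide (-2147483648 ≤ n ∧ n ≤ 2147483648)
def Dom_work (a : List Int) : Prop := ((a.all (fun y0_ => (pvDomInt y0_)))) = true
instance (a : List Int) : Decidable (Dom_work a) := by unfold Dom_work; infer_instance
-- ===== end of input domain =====

-- B replaces A's coordinate compression + Fenwick tree by a direct scan of the
-- previous prefix sums (simpler, no sorting/dict/tree; not faster).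

-- ===== PORT A =====
-- p & -p
def pyLowbit (p : Int) : Int := PySem.Int.band p (-p)

-- FenwickTree.add inner while loop ("while p <= self._n: self.data[p-1] += x; p += p & -p").
-- The extra conjunct `0 < pyLowbit p` is a totality guard: it holds whenever the Python
-- loop runs (p ≥ 1 there).
def fenAddLoop (n x : Int) (p : Int) (data : List Int) : List Int :=
  if h : p ≤ n ∧ 0 < pyLowbit p then
    fenAddLoop n x (p + pyLowbit p)
      (PySem.List.pySetD data (p - 1) (PySem.List.pyGetD data (p - 1) 0 + x))
  else data
termination_by (n + 1 - p).toNat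
decreasing_by omega

-- FenwickTree._sum while loop ("while r > 0: s += self.data[r-1]; r -= r & -r").
-- The conjuncts after `0 < r` are totality guards, true whenever r > 0.
def fenSumLoop (data : List Int) (r s : Int) : Int :=
  if h : 0 < r ∧ 0 < pyLowbit r ∧ pyLowbit r ≤ r then
    fenSumLoop data (r - pyLowbit r) (s + PySem.List.pyGetD data (r - 1) 0)
  else s
termination_by r.toNat
decreasing_by omega

def work (a : List Int) : Int :=
  let ps := List.scanl (· + ·) 0 a                      -- accumulate(a, initial=0)
  let b := PySem.List.sorted (PySem.Set.ofList ps) (fun x => x)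
  let mp := (PySem.List.enumerate b).foldl (fun d p => d.insert p.2 p.1) PySem.Dict.empty
  let n := PySem.List.len b + 5
  let data0 := List.replicate n.toNat (0 : Int)
  -- fen.add(mp[0], 1); mp[0] never raises (0 is itself a prefix sum), so getD is exact
  let data1 := fenAddLoop n 1 (mp.getD 0 0 + 1) data0
  (a.foldl (fun st x =>
      let s := st.1 + x
      let ds := mp.getD s 0                             -- mp[s]; s is always a key
      (s, st.2.1 + fenSumLoop st.2.2 ds 0, fenAddLoop n 1 (ds + 1) st.2.2))
    (0, 0, data1)).2.1

-- ===== PORT B =====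
def work_alt (a : List Int) : Int :=
  (a.foldl (fun st x =>
      let s := st.1 + x
      (s, st.2.1 + (st.2.2.countP (fun t => decide (t < s)) : Int), st.2.2 ++ [s]))
    (0, 0, ([0] : List Int))).2.1

-- ===== PRECONDITION & SPEC =====
def Spec_work (a : List Int) (out : Int) : Prop := out = work_alt a
instance (a : List Int) (out : Int) : Decidable (Spec_work a out) := by unfold Spec_work; infer_instance

-- ===== CLAIM (what is proved, stated in full; the proofs are below) =====
def Claim_equal_work : Prop := ∀ (a : List Int), Dom_work a → Spec_work a (work a)

-- ===== LEMMAS AND PROOFS =====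

theorem land_even (k : Nat) : (2*k) &&& (2*(k-1)+1) = 2*(k &&& (k-1)) := by
  show Nat.bitwise and (2*k) (2*(k-1)+1) = 2 * Nat.bitwise and k (k-1)
  have := Nat.bitwise_bit (f := and) rfl false k true (k-1)
  simpa [Nat.bit, two_mul] using this
theorem land_odd (k : Nat) : (2*k+1) &&& (2*k) = 2*(k &&& k) := by
  show Nat.bitwise and (2*k+1) (2*k) = 2 * Nat.bitwise and k k
  have := Nat.bitwise_bit (f := and) rfl true k false k
  simpa [Nat.bit, two_mul] using this
theorem land_pred (m : Nat) (hm : 0 < m) : m &&& (m - 1) = m - 2 ^ padicValNat 2 m := by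
  induction m using Nat.strong_induction_on with
  | _ m ih =>
    rcases Nat.even_or_odd m with he | ho
    · obtain ⟨k, hk⟩ := he
      have hk0 : 0 < k := by omega
      have hm2 : m = 2 * k := by omega
      have hsub : 2 * k - 1 = 2 * (k - 1) + 1 := by omega
      have hv : padicValNat 2 m = padicValNat 2 k + 1 := by
        rw [hm2, padicValNat.mul (by omega) (by omega), padicValNat.self (by omega)]
        omega
      have hle := Nat.le_of_dvd hk0 (pow_padicValNat_dvd (p := 2) (n := k))
      rw [hm2, hsub, land_even, ih k (by omega) hk0, ← hm2, hv, pow_succ]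
      omega
    · obtain ⟨k, hk⟩ := ho
      have hv : padicValNat 2 m = 0 := padicValNat.eq_zero_of_not_dvd (by omega)
      have hself : k &&& k = k := by simp
      rw [hk, show 2*k+1-1 = 2*k from rfl, land_odd, hself, ← hk, hv]
      omega

theorem two_pow_padic_le (m : Nat) (hm : 0 < m) : 2 ^ padicValNat 2 m ≤ m :=
  Nat.le_of_dvd hm pow_padicValNat_dvd

theorem pyLowbit_eq (p : Int) (hp : 0 < p) :
    pyLowbit p = ((2 ^ padicValNat 2 p.toNat : Nat) : Int) := by
  have h1 : (0:Int) ≤ p := le_of_lt hp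
  have h2 : ¬ (0:Int) ≤ -p := by omega
  unfold pyLowbit PySem.Int.band
  rw [if_pos h1, if_neg h2]
  have h3 : (-(-p) - 1).toNat = p.toNat - 1 := by omega
  rw [h3, land_pred p.toNat (by omega)]
  have hle := two_pow_padic_le p.toNat (by omega)
  generalize hgen : 2 ^ padicValNat 2 p.toNat = k at *
  have h4 : p.toNat - (p.toNat - k) = k := by omega
  rw [h4]

theorem padic_add_lowbit (q : Nat) (hq : 0 < q) :
    padicValNat 2 q + 1 ≤ padicValNat 2 (q + 2 ^ padicValNat 2 q) := by
  set A := padicValNat 2 q with hA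
  obtain ⟨c, hc⟩ : 2 ^ A ∣ q := pow_padicValNat_dvd
  have hodd : ¬ 2 ∣ c := by
    intro ⟨d, hd⟩
    have : 2 ^ (A + 1) ∣ q := ⟨d, by rw [hc, hd]; ring⟩
    exact pow_succ_padicValNat_not_dvd (by omega) this
  obtain ⟨e, he⟩ : 2 ∣ (c + 1) := by omega
  have hdvd : 2 ^ (A + 1) ∣ q + 2 ^ A := ⟨e, by
    calc q + 2 ^ A = 2 ^ A * (c + 1) := by rw [hc]; ring
    _ = 2 ^ A * (2 * e) := by rw [he]
    _ = 2 ^ (A + 1) * e := by rw [pow_succ]; ring⟩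
  exact (padicValNat_dvd_iff_le (by positivity)).mp hdvd

theorem padic_add_small (q t : Nat) (hq : 0 < q) (ht : 0 < t)
    (hlt : t < 2 ^ padicValNat 2 q) : padicValNat 2 (q + t) = padicValNat 2 t := by
  set A := padicValNat 2 q with hA
  set c := padicValNat 2 t with hc
  have hct : (2:Nat) ^ c ∣ t := pow_padicValNat_dvd
  have hcA : c < A := by
    have h1 : 2 ^ c ≤ t := Nat.le_of_dvd ht hct
    have := Nat.pow_lt_pow_iff_right (a := 2) (by omega) (n := c) (m := A)
    omega
  have hcq : (2:Nat) ^ c ∣ q := dvd_trans (pow_dvd_pow 2 (le_of_lt hcA)) pow_padicValNat_dvd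
  have hdvd : (2:Nat) ^ c ∣ q + t := Dvd.dvd.add hcq hct
  have hnd : ¬ (2:Nat) ^ (c+1) ∣ q + t := by
    intro hd
    have hq1 : (2:Nat) ^ (c+1) ∣ q := dvd_trans (pow_dvd_pow 2 hcA) pow_padicValNat_dvd
    have ht1 : (2:Nat) ^ (c+1) ∣ t := by
      have := Nat.dvd_sub hd hq1
      simpa using this
    have := (padicValNat_dvd_iff_le (show t ≠ 0 by omega)).mp ht1
    omega
  have h1 := (padicValNat_dvd_iff_le (show q + t ≠ 0 by omega)).mp hdvd
  have h2 : ¬ (c + 1 ≤ padicValNat 2 (q + t)) := fun hle =>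
    hnd ((padicValNat_dvd_iff_le (show q + t ≠ 0 by omega)).mpr hle)
  omega

theorem natF3 (q j : Nat) (hq : 0 < q) (hqj : q < j)
    (h : j - 2 ^ padicValNat 2 j < q) : q + 2 ^ padicValNat 2 q ≤ j := by
  by_contra hcon
  set t := j - q with htdef
  have ht : 0 < t := by omega
  have hlt : t < 2 ^ padicValNat 2 q := by omega
  have hv : padicValNat 2 j = padicValNat 2 t := by
    have := padic_add_small q t hq ht hlt
    rwa [show q + t = j by omega] at this
  have hle : 2 ^ padicValNat 2 t ≤ t := Nat.le_of_dvd ht pow_padicValNat_dvd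
  rw [hv] at h
  omega

theorem natF2 (q j : Nat) (hq : 0 < q) (hj : q + 2 ^ padicValNat 2 q ≤ j)
    (h : j - 2 ^ padicValNat 2 j < q + 2 ^ padicValNat 2 q) :
    j - 2 ^ padicValNat 2 j < q := by
  by_contra hcon
  set A := padicValNat 2 q with hA
  set B := padicValNat 2 j with hB
  have hj0 : 0 < j := by omega
  have hBj : (2:Nat) ^ B ∣ j := pow_padicValNat_dvd
  have hAq : (2:Nat) ^ A ∣ q := pow_padicValNat_dvd
  have hBle : 2 ^ B ≤ j := Nat.le_of_dvd hj0 hBj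
  set t := j - 2 ^ B - q with htdef
  have hjt : j = q + t + 2 ^ B := by omega
  have htA : t < 2 ^ A := by omega
  have hvadd : A + 1 ≤ padicValNat 2 (q + 2 ^ A) := padic_add_lowbit q hq
  rcases Nat.lt_or_ge B A with hBA | hAB
  · -- B < A
    have hBA2 : (2:Nat) ^ B ∣ 2 ^ A := pow_dvd_pow 2 (le_of_lt hBA)
    have hBq : (2:Nat) ^ B ∣ q := dvd_trans hBA2 hAq
    have hBt : (2:Nat) ^ B ∣ t := by
      have h2 := Nat.dvd_sub (Nat.dvd_sub hBj (dvd_refl _)) hBq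
      rwa [show j - 2 ^ B - q = t by omega] at h2
    have hge : 2 ^ A ≤ t + 2 ^ B := by omega
    rcases Nat.eq_or_lt_of_le hge with heq | hlt2
    · have hjq : j = q + 2 ^ A := by omega
      rw [← hjq] at hvadd
      omega
    · set w := t + 2 ^ B - 2 ^ A with hw
      have hw0 : 0 < w := by omega
      have hwlt : w < 2 ^ B := by omega
      have hBw : (2:Nat) ^ B ∣ w := by
        have := Nat.dvd_sub (Nat.dvd_add hBt (dvd_refl ((2:Nat) ^ B))) hBA2
        rwa [show t + 2 ^ B - 2 ^ A = w by omega] at this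
      have := Nat.le_of_dvd hw0 hBw
      omega
  · -- A ≤ B
    have hAj : (2:Nat) ^ A ∣ j := dvd_trans (pow_dvd_pow 2 hAB) hBj
    have hAB2 : (2:Nat) ^ A ∣ 2 ^ B := pow_dvd_pow 2 hAB
    have hAt : (2:Nat) ^ A ∣ t := by
      have h1 := Nat.dvd_sub (Nat.dvd_sub hAj hAB2) hAq
      rwa [show j - 2 ^ B - q = t by omega] at h1
    have ht0 : t = 0 := by
      rcases Nat.eq_zero_or_pos t with h0 | hpos
      · exact h0
      · exact absurd htA (by have := Nat.le_of_dvd hpos hAt; omega)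
    have hjB : j = q + 2 ^ B := by omega
    rcases Nat.eq_or_lt_of_le hAB with heq | hlt2
    · rw [hjB, ← heq] at hB
      omega
    · have hBq : (2:Nat) ^ B ∣ q := by
        have := Nat.dvd_sub hBj (dvd_refl ((2:Nat) ^ B))
        rwa [show j - 2 ^ B = q by omega] at this
      have := (padicValNat_dvd_iff_le (show q ≠ 0 by omega)).mp hBq
      omega

theorem lowb_pos (p : Int) (hp : 0 < p) : 0 < pyLowbit p ∧ pyLowbit p ≤ p := by
  rw [pyLowbit_eq p hp]
  have h1 : 0 < 2 ^ padicValNat 2 p.toNat := by positivity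
  have h2 := two_pow_padic_le p.toNat (by omega)
  omega

theorem lowbF3 (q j : Int) (hq : 0 < q) (hqj : q < j) (h : j - pyLowbit j < q) :
    q + pyLowbit q ≤ j := by
  rw [pyLowbit_eq q hq] at *
  rw [pyLowbit_eq j (by omega)] at *
  have hj2 := two_pow_padic_le j.toNat (by omega)
  have := natF3 q.toNat j.toNat (by omega) (by omega) (by omega)
  omega

theorem lowbF2 (q j : Int) (hq : 0 < q) (hj : q + pyLowbit q ≤ j)
    (h : j - pyLowbit j < q + pyLowbit q) : j - pyLowbit j < q := by
  have hq2 := two_pow_padic_le q.toNat (by omega)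
  have h1 : 0 < 2 ^ padicValNat 2 q.toNat := by positivity
  rw [pyLowbit_eq q hq] at *
  have hjpos : 0 < j := by omega
  rw [pyLowbit_eq j hjpos] at *
  have hj2 := two_pow_padic_le j.toNat (by omega)
  have := natF2 q.toNat j.toNat (by omega) (by omega) (by omega)
  omega

theorem fenAddLoop_length (n x p : Int) (data : List Int) :
    (fenAddLoop n x p data).length = data.length := by
  induction p, data using fenAddLoop.induct n x with
  | case1 p data h ih =>
    rw [fenAddLoop, dif_pos h]
    rw [ih]
    exact PySem.List.length_pySetD _ _ _
  | case2 p data h =>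
    rw [fenAddLoop, dif_neg h]

theorem fenAddLoop_getD (n x : Int) (q : Int) (data : List Int) (hq : 0 < q)
    (hlen : n ≤ (data.length : Int)) (i : Nat) :
    (fenAddLoop n x q data).getD i 0 = data.getD i 0 +
      (if q ≤ (i : Int) + 1 ∧ (i : Int) + 1 ≤ n ∧
          (i : Int) + 1 - pyLowbit ((i : Int) + 1) < q then x else 0) := by
  induction q, data using fenAddLoop.induct n x with
  | case1 q data h ih =>
    rw [fenAddLoop, dif_pos h]
    have hlb : 0 < pyLowbit q := h.2
    have hq1 : (0:Int) ≤ q - 1 := by omega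
    have hidx : (q - 1).toNat < data.length := by omega
    rw [PySem.List.pySetD_of_nonneg data _ hq1, PySem.List.pyGetD_of_nonneg data 0 hq1] at ih ⊢
    rw [ih (by omega) (by rw [List.length_set]; omega)]
    rw [List.getD_eq_getElem?_getD, List.getD_eq_getElem?_getD, List.getElem?_set]
    by_cases hiq : (q - 1).toNat = i
    · have hji : (i : Int) + 1 = q := by omega
      rw [if_pos hiq, if_pos hidx]
      rw [if_neg (by omega), if_pos ⟨by omega, by omega, by rw [hji]; omega⟩]
      simp only [Option.getD_some, add_zero, List.getD_eq_getElem?_getD]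
      rw [hiq]
    · rw [if_neg hiq]
      have hjq : (i : Int) + 1 ≠ q := by omega
      congr 1
      by_cases hc : q ≤ (i : Int) + 1 ∧ (i : Int) + 1 ≤ n ∧ (i : Int) + 1 - pyLowbit ((i : Int) + 1) < q
      · rw [if_pos hc, if_pos ?_]
        refine ⟨?_, hc.2.1, by have := hc.2.2; omega⟩
        exact lowbF3 q ((i:Int)+1) (by omega) (by have := hc.1; omega) hc.2.2
      · rw [if_neg hc, if_neg ?_]
        intro ⟨h1, h2, h3⟩
        exact hc ⟨by omega, h2, lowbF2 q ((i:Int)+1) (by omega) h1 h3⟩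
  | case2 q data h =>
    rw [fenAddLoop, dif_neg h]
    have hn : n < q := by
      rcases Int.lt_or_le n q with h1 | h1
      · exact h1
      · exact absurd ⟨h1, (lowb_pos q hq).1⟩ h
    rw [if_neg (by omega)]
    omega

theorem countP_le_split {α : Type} (l : List α) (pos : α → Int) (a b : Int) (hab : a ≤ b) :
    l.countP (fun v => decide (pos v ≤ b)) =
      l.countP (fun v => decide (pos v ≤ a)) +
      l.countP (fun v => decide (a < pos v ∧ pos v ≤ b)) := by
  induction l with
  | nil => rfl
  | cons x t ih =>
    simp only [List.countP_cons, ih, decide_eq_true_eq]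
    split_ifs <;> omega
theorem fenSumLoop_eq {α : Type} (data : List Int) (ins : List α) (pos : α → Int) (n : Int)
    (hpos : ∀ v ∈ ins, 0 < pos v)
    (hdata : ∀ i : Nat, (i : Int) + 1 ≤ n → data.getD i 0 =
      (ins.countP (fun v => decide ((i : Int) + 1 - pyLowbit ((i : Int) + 1) < pos v ∧
        pos v ≤ (i : Int) + 1)) : Int))
    (r s : Int) (hr0 : 0 ≤ r) (hrn : r ≤ n) :
    fenSumLoop data r s = s + (ins.countP (fun v => decide (pos v ≤ r)) : Int) := by
  induction r, s using fenSumLoop.induct data with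
  | case1 r s h ih =>
    rw [fenSumLoop, dif_pos h]
    have hr1 : (0:Int) ≤ r - 1 := by omega
    rw [PySem.List.pyGetD_of_nonneg data 0 hr1] at ih ⊢
    have hcast : ((r - 1).toNat : Int) + 1 = r := by omega
    have hdr := hdata (r - 1).toNat (by omega)
    rw [hcast] at hdr
    rw [ih (by omega) (by omega), hdr]
    rw [countP_le_split ins pos (r - pyLowbit r) r (by omega)]
    push_cast
    ring
  | case2 r s h =>
    rw [fenSumLoop, dif_neg h]
    have hr0' : r = 0 := by
      by_contra hne
      have hrpos : 0 < r := by omega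
      exact h ⟨hrpos, (lowb_pos r hrpos).1, (lowb_pos r hrpos).2⟩
    have hreq : (ins.countP (fun v => decide (pos v ≤ r))) = 0 := by
      rw [List.countP_eq_zero]
      intro v hv
      have := hpos v hv
      simp only [decide_eq_true_eq, hr0']
      omega
    rw [hreq]
    simp

theorem rankDict_get (l : List Int) (hnd : l.Nodup) : ∀ (s : Int) (d : PySem.Dict Int Int) (x : Int),
    ((PySem.List.enumerate l s).foldl (fun d p => d.insert p.2 p.1) d).get? x
      = if x ∈ l then some (s + (l.idxOf x : Int)) else d.get? x := by
  induction l with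
  | nil => intro s d x; simp [PySem.List.enumerate_nil]
  | cons y t ih =>
    intro s d x
    rw [PySem.List.enumerate_cons]
    simp only [List.foldl_cons]
    rcases List.nodup_cons.mp hnd with ⟨hyt, hndt⟩
    rw [ih hndt (s+1) (d.insert y s) x]
    by_cases hxt : x ∈ t
    · rw [if_pos hxt, if_pos (List.mem_cons_of_mem y hxt)]
      have hxy' : (y == x) = false := by
        refine beq_eq_false_iff_ne.mpr ?_
        intro heq
        exact hyt (by rwa [heq])
      rw [List.idxOf_cons, hxy']
      simp only [Bool.cond_false]
      congr 1
      push_cast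
      ring
    · rw [if_neg hxt]
      by_cases hxy : x = y
      · rw [PySem.Dict.get?_insert, if_pos hxy, if_pos (by simp [hxy])]
        rw [hxy, List.idxOf_cons]
        simp
      · rw [PySem.Dict.get?_insert, if_neg hxy, if_neg (by simp [hxy, hxt])]

theorem idxOf_lt_iff (b : List Int) (hb : b.Pairwise (· < ·)) (u w : Int)
    (hu : u ∈ b) (hw : w ∈ b) : b.idxOf u < b.idxOf w ↔ u < w := by
  have hlu : b.idxOf u < b.length := List.idxOf_lt_length_of_mem hu
  have hlw : b.idxOf w < b.length := List.idxOf_lt_length_of_mem hw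
  have hgu : b[b.idxOf u] = u := List.getElem_idxOf hlu
  have hgw : b[b.idxOf w] = w := List.getElem_idxOf hlw
  have hpair := List.pairwise_iff_getElem.mp hb
  constructor
  · intro hlt
    have := hpair _ _ hlu hlw hlt
    rwa [hgu, hgw] at this
  · intro huw
    rcases Nat.lt_trichotomy (b.idxOf u) (b.idxOf w) with h | h | h
    · exact h
    · exfalso
      simp only [h] at hgu
      rw [hgw] at hgu
      omega
    · have := hpair _ _ hlw hlu h
      rw [hgu, hgw] at this
      omega

theorem loop_eq (b : List Int) (mp : PySem.Dict Int Int) (n : Int)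
    (hb : b.Pairwise (· < ·))
    (hmp : ∀ v, v ∈ b → mp.getD v 0 = (b.idxOf v : Int))
    (hn : (b.length : Int) + 5 = n) :
    ∀ (l : List Int) (s res : Int) (data prev : List Int),
    (∀ v ∈ List.scanl (· + ·) s l, v ∈ b) →
    (∀ v ∈ prev, v ∈ b) →
    ((data.length : Int) = n) →
    (∀ i : Nat, (i : Int) + 1 ≤ n → data.getD i 0 =
      (prev.countP (fun v => decide ((i : Int) + 1 - pyLowbit ((i : Int) + 1) < (b.idxOf v : Int) + 1 ∧
        (b.idxOf v : Int) + 1 ≤ (i : Int) + 1)) : Int)) →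
    (l.foldl (fun st x =>
        let s := st.1 + x
        let ds := mp.getD s 0
        (s, st.2.1 + fenSumLoop st.2.2 ds 0, fenAddLoop n 1 (ds + 1) st.2.2))
      (s, res, data)).2.1
    = (l.foldl (fun st x =>
        let s := st.1 + x
        (s, st.2.1 + (st.2.2.countP (fun t => decide (t < s)) : Int), st.2.2 ++ [s]))
      (s, res, prev)).2.1 := by
  intro l
  induction l with
  | nil => intro s res data prev _ _ _ _; rfl
  | cons x t ih =>
    intro s res data prev hsl hprev hlen hdata
    simp only [List.foldl_cons]
    have hs' : s + x ∈ b := by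
      apply hsl
      rw [List.scanl_cons]
      rcases t with _ | ⟨y, t'⟩
      · simp [List.scanl_nil]
      · rw [List.scanl_cons]; simp
    have hds : mp.getD (s + x) 0 = (b.idxOf (s + x) : Int) := hmp _ hs'
    have hrlt : b.idxOf (s + x) < b.length := List.idxOf_lt_length_of_mem hs'
    -- the Fenwick prefix sum counts previous prefix sums with smaller rank
    have hsum : fenSumLoop data (mp.getD (s + x) 0) 0 =
        (prev.countP (fun v => decide (v < s + x)) : Int) := by
      rw [hds]
      rw [fenSumLoop_eq data prev (fun v => (b.idxOf v : Int) + 1) n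
        (by intro v hv; positivity)
        hdata _ 0 (by positivity) (by omega)]
      rw [zero_add]
      congr 1
      apply List.countP_congr
      intro v hv
      simp only [decide_eq_true_eq]
      constructor
      · intro hle
        have : b.idxOf v < b.idxOf (s + x) := by omega
        exact (idxOf_lt_iff b hb v (s + x) (hprev v hv) hs').mp this
      · intro hlt
        have := (idxOf_lt_iff b hb v (s + x) (hprev v hv) hs').mpr hlt
        omega
    rw [hsum]
    -- apply the induction hypothesis to the new state
    apply ih
    · intro v hv
      apply hsl
      rw [List.scanl_cons]
      exact List.mem_cons_of_mem _ hv
    · intro v hv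
      rcases List.mem_append.mp hv with h1 | h1
      · exact hprev v h1
      · rw [List.mem_singleton.mp h1]; exact hs'
    · rw [fenAddLoop_length]; exact hlen
    · intro i hi
      rw [fenAddLoop_getD n 1 (mp.getD (s + x) 0 + 1) data (by rw [hds]; positivity) (by omega) i]
      rw [hdata i hi, List.countP_append]
      simp only [List.countP_singleton, decide_eq_true_eq, hds]
      push_cast
      congr 1
      by_cases hc : (b.idxOf (s+x) : Int) + 1 ≤ (i : Int) + 1 ∧
          (i : Int) + 1 - pyLowbit ((i : Int) + 1) < (b.idxOf (s+x) : Int) + 1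
      · rw [if_pos ⟨hc.1, hi, hc.2⟩, if_pos ⟨hc.2, hc.1⟩]
      · rw [if_neg (by tauto), if_neg (by tauto)]

theorem work_eq (a : List Int) : work a = work_alt a := by
  simp only [work, work_alt]
  set ps := List.scanl (· + ·) 0 a with hps
  set b := PySem.List.sorted (PySem.Set.ofList ps) (fun x => x) with hbdef
  set mp := (PySem.List.enumerate b).foldl (fun d p => d.insert p.2 p.1) PySem.Dict.empty with hmpdef
  set n := PySem.List.len b + 5 with hndef
  have hn5 : n = (b.length : Int) + 5 := by rw [hndef, PySem.List.len_eq]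
  have hmem : ∀ x : Int, x ∈ b ↔ x ∈ ps := fun x =>
    ((PySem.List.sorted_perm (PySem.Set.ofList ps) (fun x => x) false).mem_iff).trans
      (PySem.Set.mem_ofList ps x)
  have hnd : b.Nodup :=
    ((PySem.List.sorted_perm (PySem.Set.ofList ps) (fun x => x) false).nodup_iff).mpr
      (PySem.Set.nodup_ofList ps)
  have hb : b.Pairwise (· < ·) := by
    have h1 := PySem.List.sorted_pairwise (κ := Int) (PySem.Set.ofList ps) (fun x => x)
    exact (h1.and hnd).imp (fun h => lt_of_le_of_ne h.1 h.2)
  have h0ps : (0 : Int) ∈ ps := by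
    rw [hps]; rcases a with _ | ⟨y, t⟩
    · simp
    · rw [List.scanl_cons]; simp
  have h0b : (0 : Int) ∈ b := (hmem 0).mpr h0ps
  have hmp : ∀ v, v ∈ b → mp.getD v 0 = (b.idxOf v : Int) := by
    intro v hv
    rw [hmpdef, PySem.Dict.getD_eq_get?_getD, rankDict_get b hnd 0 PySem.Dict.empty v,
      if_pos hv]
    simp
  have hnn : (0:Int) ≤ n := by omega
  have hlen0 : ((List.replicate n.toNat (0:Int)).length : Int) = n := by
    simp [List.length_replicate]; omega
  have hq0 : (0:Int) < mp.getD 0 0 + 1 := by rw [hmp 0 h0b]; positivity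
  have hlen1 : ((fenAddLoop n 1 (mp.getD 0 0 + 1) (List.replicate n.toNat 0)).length : Int) = n := by
    rw [fenAddLoop_length]; exact hlen0
  have hdata1 : ∀ i : Nat, (i : Int) + 1 ≤ n →
      (fenAddLoop n 1 (mp.getD 0 0 + 1) (List.replicate n.toNat 0)).getD i 0 =
      (([(0:Int)]).countP (fun v => decide ((i : Int) + 1 - pyLowbit ((i : Int) + 1) < (b.idxOf v : Int) + 1 ∧
        (b.idxOf v : Int) + 1 ≤ (i : Int) + 1)) : Int) := by
    intro i hi
    rw [fenAddLoop_getD n 1 _ _ hq0 (by omega) i]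
    rw [List.getD_replicate _ (by omega)]
    simp only [List.countP_singleton, decide_eq_true_eq, hmp 0 h0b, zero_add]
    by_cases hc : (b.idxOf (0:Int) : Int) + 1 ≤ (i : Int) + 1 ∧
        (i : Int) + 1 - pyLowbit ((i : Int) + 1) < (b.idxOf (0:Int) : Int) + 1
    · rw [if_pos ⟨hc.1, hi, hc.2⟩, if_pos ⟨hc.2, hc.1⟩]; simp
    · rw [if_neg (by tauto), if_neg (by tauto)]; simp
  exact loop_eq b mp n hb hmp (by omega) a 0 0 _ [0]
    (fun v hv => (hmem v).mpr hv)
    (fun v hv => by rw [List.mem_singleton.mp hv]; exact h0b)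
    hlen1 hdata1

-- ===== VERDICT (by name: the statement is the Claim_ definition above) =====
theorem work_spec : Claim_equal_work := by
  unfold Claim_equal_work Spec_work
  intro a _
  exact work_eq a
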